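-- pv_equiv track=rewrite | github.com/danelynnn/quiz-1 | quiz_1/tic_tac_toe.py | countDirection
-- ===== SOURCE A (Python) =====
-- WIN = 3
--
-- def countDirection(board, x, y, xd, yd, player):
--     # count how many same marks are in the direction, then
--     # count how many marks are in the opposite direction and add them up (if not finished yet)
--     count = 1
--     xtest, ytest = x, y
--     while (
--         xtest + xd >= 0
--         and xtest + xd <= len(board) - 1
--         and ytest + yd >= 0
--         and ytest + yd <= len(board) - 1
--     ):
--         xtest += xd
--         ytest += yd
--
--         if board[ytest][xtest] == player:
--             count += 1
--             if count == WIN: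
--                 return count
--         else:
--             break
--
--     xtest, ytest = x, y
--     while (
--         xtest - xd >= 0
--         and xtest - xd <= len(board) - 1
--         and ytest - yd >= 0
--         and ytest - yd <= len(board) - 1
--     ):
--         xtest -= xd
--         ytest -= yd
--
--         if board[ytest][xtest] == player:
--             count += 1
--             if count == WIN:
--                 return count
--         else:
--             break
--
--     return count
-- ===== SOURCE B (Python) =====
-- WIN = 3
--
-- def countDirection(board, x, y, xd, yd, player):
--     # Loop-free: since WIN == 3, only the four cells at offsets -2,-1,+1,+2 along
--     # (xd, yd) can matter.  Materialise a boolean table of "in bounds and holds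
--     # player's mark" for those offsets, turn it into the two capped run lengths
--     # by arithmetic on the booleans, and cap the total at WIN.
--     n = len(board)
--
--     def hit(k):
--         tx, ty = x + k * xd, y + k * yd
--         return 0 <= tx < n and 0 <= ty < n and board[ty][tx] == player
--
--     m = [hit(k) for k in (-2, -1, 1, 2)]
--     fwd = m[2] + (m[2] and m[3])
--     back = m[1] + (m[1] and m[0])
--     return min(1 + fwd + back, WIN)
-- ===== Notes on version B (the rewrite author's own statement) =====
-- stated objective: alternative
-- what changed: Eliminates iteration entirely: since WIN = 3 only the four cells at offsets -2,-1,+1,+2 along (xd,yd) can matter, so B materialises a fixed boolean table 'in bounds and holds the mark' for those offsets and computes the capped total by branch-free arithmetic on the booleans, min(1+fwd+back, WIN), instead of A's two early-return while loops.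
import Mathlib
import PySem

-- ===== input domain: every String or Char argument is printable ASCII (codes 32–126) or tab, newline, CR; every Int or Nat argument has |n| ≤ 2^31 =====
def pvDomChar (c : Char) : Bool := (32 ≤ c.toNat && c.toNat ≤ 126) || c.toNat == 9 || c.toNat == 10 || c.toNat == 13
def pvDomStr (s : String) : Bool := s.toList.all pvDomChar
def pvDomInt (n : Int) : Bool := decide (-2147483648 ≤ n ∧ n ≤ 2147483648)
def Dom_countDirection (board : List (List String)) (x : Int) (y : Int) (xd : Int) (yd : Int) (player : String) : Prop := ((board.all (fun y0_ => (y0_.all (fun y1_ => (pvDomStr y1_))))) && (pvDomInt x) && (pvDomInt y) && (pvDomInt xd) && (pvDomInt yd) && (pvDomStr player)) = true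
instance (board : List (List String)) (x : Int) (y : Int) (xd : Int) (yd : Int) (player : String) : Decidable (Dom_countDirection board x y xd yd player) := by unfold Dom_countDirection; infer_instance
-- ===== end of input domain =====

-- B drops A's two early-return while loops for a fixed boolean table of the four cells at
-- offsets ±1, ±2 (all that can matter with WIN = 3) combined by branch-free arithmetic
-- (objective: alternative, same cost).


-- board[ty][tx]; the .getD defaults are never consulted on inputs admitted by Pre_countDirection
def pvCellAt (board : List (List String)) (tx ty : Int) : String :=
  (PySem.List.pyGet? ((PySem.List.pyGet? board ty).getD []) tx).getD ""

-- ===== PORT A =====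
-- A's first while loop; fuel only makes the recursion total (2 always suffices: the loop
-- body either breaks, returns early at count == WIN, or increments count, and WIN = 3).
-- Result: (final count, early-return flag).
def loopA1 (board : List (List String)) (xd yd : Int) (player : String) :
    Nat → Int → Int → Int → Int × Bool
  | 0, _, _, count => (count, false)
  | fuel + 1, xtest, ytest, count =>
    if xtest + xd ≥ 0 ∧ xtest + xd ≤ (board.length : Int) - 1 ∧
       ytest + yd ≥ 0 ∧ ytest + yd ≤ (board.length : Int) - 1 then
      if pvCellAt board (xtest + xd) (ytest + yd) == player then
        if count + 1 == 3 then (count + 1, true)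
        else loopA1 board xd yd player fuel (xtest + xd) (ytest + yd) (count + 1)
      else (count, false)
    else (count, false)

-- A's second while loop (the minus-sign copy)
def loopA2 (board : List (List String)) (xd yd : Int) (player : String) :
    Nat → Int → Int → Int → Int × Bool
  | 0, _, _, count => (count, false)
  | fuel + 1, xtest, ytest, count =>
    if xtest - xd ≥ 0 ∧ xtest - xd ≤ (board.length : Int) - 1 ∧
       ytest - yd ≥ 0 ∧ ytest - yd ≤ (board.length : Int) - 1 then
      if pvCellAt board (xtest - xd) (ytest - yd) == player then
        if count + 1 == 3 then (count + 1, true)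
        else loopA2 board xd yd player fuel (xtest - xd) (ytest - yd) (count + 1)
      else (count, false)
    else (count, false)

def countDirection (board : List (List String)) (x : Int) (y : Int) (xd : Int) (yd : Int) (player : String) : Int :=
  let r1 := loopA1 board xd yd player 2 x y 1
  if r1.2 then r1.1
  else (loopA2 board xd yd player 2 x y r1.1).1

-- ===== PORT B =====
-- Source B's hit(k): the cell k steps along (xd, yd) is in bounds and holds player's mark
def hitB (board : List (List String)) (x y xd yd : Int) (player : String) (k : Int) : Bool :=
  let tx := x + k * xd
  let ty := y + k * yd
  decide (0 ≤ tx ∧ tx < (board.length : Int) ∧ 0 ≤ ty ∧ ty < (board.length : Int)) &&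
    (pvCellAt board tx ty == player)

def countDirection_alt (board : List (List String)) (x : Int) (y : Int) (xd : Int) (yd : Int) (player : String) : Int :=
  let m0 := hitB board x y xd yd player (-2)
  let m1 := hitB board x y xd yd player (-1)
  let m2 := hitB board x y xd yd player 1
  let m3 := hitB board x y xd yd player 2
  let fwd : Int := (if m2 then 1 else 0) + (if m2 && m3 then 1 else 0)
  let back : Int := (if m1 then 1 else 0) + (if m1 && m0 then 1 else 0)
  min (1 + fwd + back) 3

-- ===== PRECONDITION & SPEC =====
-- Pre_ excludes ragged boards on which one of the up-to-four cells within WIN-1 steps along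
-- ±(xd,yd) passes the len(board) bounds test (both axes tested against len(board)) but lies
-- beyond its own shorter row: there the Pythons can raise IndexError, or (when a break stops
-- A just before such a cell) A returns while B's table construction touches it and raises.
-- Each conjunct reads: if the cell's coordinates pass the bounds test, its column index is
-- inside its row.
def Pre_countDirection (board : List (List String)) (x : Int) (y : Int) (xd : Int) (yd : Int) (player : String) : Prop :=
  ((0 ≤ x + xd ∧ x + xd ≤ (board.length : Int) - 1 ∧ 0 ≤ y + yd ∧ y + yd ≤ (board.length : Int) - 1) →
      x + xd < (((PySem.List.pyGet? board (y + yd)).getD []).length : Int)) ∧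
  ((0 ≤ x + xd + xd ∧ x + xd + xd ≤ (board.length : Int) - 1 ∧ 0 ≤ y + yd + yd ∧ y + yd + yd ≤ (board.length : Int) - 1) →
      x + xd + xd < (((PySem.List.pyGet? board (y + yd + yd)).getD []).length : Int)) ∧
  ((0 ≤ x - xd ∧ x - xd ≤ (board.length : Int) - 1 ∧ 0 ≤ y - yd ∧ y - yd ≤ (board.length : Int) - 1) →
      x - xd < (((PySem.List.pyGet? board (y - yd)).getD []).length : Int)) ∧
  ((0 ≤ x - xd - xd ∧ x - xd - xd ≤ (board.length : Int) - 1 ∧ 0 ≤ y - yd - yd ∧ y - yd - yd ≤ (board.length : Int) - 1) →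
      x - xd - xd < (((PySem.List.pyGet? board (y - yd - yd)).getD []).length : Int))
instance (board : List (List String)) (x : Int) (y : Int) (xd : Int) (yd : Int) (player : String) : Decidable (Pre_countDirection board x y xd yd player) := by unfold Pre_countDirection; infer_instance

def pvWitness_countDirection : List (List String) × Int × Int × Int × Int × String :=
  ([["p", "q", "p"], ["q", "p", "q"], ["p", "q", "p"]], 0, 0, 1, 1, "p")

def Spec_countDirection (board : List (List String)) (x : Int) (y : Int) (xd : Int) (yd : Int) (player : String) (out : Int) : Prop := out = countDirection_alt board x y xd yd player
instance (board : List (List String)) (x : Int) (y : Int) (xd : Int) (yd : Int) (player : String) (out : Int) : Decidable (Spec_countDirection board x y xd yd player out) := by unfold Spec_countDirection; infer_instance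

-- ===== CLAIM (what is proved, stated in full; the proofs are below) =====
def Claim_equal_countDirection : Prop := ∀ (board : List (List String)) (x : Int) (y : Int) (xd : Int) (yd : Int) (player : String), Dom_countDirection board x y xd yd player → Pre_countDirection board x y xd yd player → Spec_countDirection board x y xd yd player (countDirection board x y xd yd player)

-- ===== LEMMAS AND PROOFS =====

-- hitB at the backward offsets with its coordinate arguments written in A's x - xd form
theorem hit_m1 (board : List (List String)) (x y xd yd : Int) (player : String) :
    hitB board x y xd yd player (-1) =
      (decide (0 ≤ x - xd ∧ x - xd < (board.length : Int) ∧
               0 ≤ y - yd ∧ y - yd < (board.length : Int)) &&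
        (pvCellAt board (x - xd) (y - yd) == player)) := by
  simp only [hitB, show x + (-1) * xd = x - xd from by ring,
             show y + (-1) * yd = y - yd from by ring]

theorem hit_m2 (board : List (List String)) (x y xd yd : Int) (player : String) :
    hitB board x y xd yd player (-2) =
      (decide (0 ≤ x - xd - xd ∧ x - xd - xd < (board.length : Int) ∧
               0 ≤ y - yd - yd ∧ y - yd - yd < (board.length : Int)) &&
        (pvCellAt board (x - xd - xd) (y - yd - yd) == player)) := by
  simp only [hitB, show x + (-2) * xd = x - xd - xd from by ring,
             show y + (-2) * yd = y - yd - yd from by ring]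

-- A's forward loop computes 1 + the capped forward run; early-return flag = both hits
theorem fwd_eval (board : List (List String)) (xd yd : Int) (player : String) (x y : Int) :
    loopA1 board xd yd player 2 x y 1 =
      (1 + (if hitB board x y xd yd player 1 then (1:Int) else 0)
         + (if hitB board x y xd yd player 1 && hitB board x y xd yd player 2 then (1:Int) else 0),
       hitB board x y xd yd player 1 && hitB board x y xd yd player 2) := by
  have h2x : x + 2 * xd = x + xd + xd := by ring
  have h2y : y + 2 * yd = y + yd + yd := by ring
  by_cases hb1 : 0 ≤ x + xd ∧ x + xd < (board.length : Int) ∧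
                 0 ≤ y + yd ∧ y + yd < (board.length : Int) <;>
  by_cases hb2 : 0 ≤ x + xd + xd ∧ x + xd + xd < (board.length : Int) ∧
                 0 ≤ y + yd + yd ∧ y + yd + yd < (board.length : Int) <;>
  cases hc1 : pvCellAt board (x + xd) (y + yd) == player <;>
  cases hc2 : pvCellAt board (x + xd + xd) (y + yd + yd) == player <;>
  simp [loopA1, hitB, one_mul, h2x, h2y, hb1, hb2, hc1, hc2]

-- A's backward loop started at count c (1 or 2) computes the min-capped total
theorem back_eval (board : List (List String)) (xd yd : Int) (player : String) (x y c : Int)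
    (hc : c = 1 ∨ c = 2) :
    (loopA2 board xd yd player 2 x y c).1 =
      min (c + (if hitB board x y xd yd player (-1) then (1:Int) else 0)
             + (if hitB board x y xd yd player (-1) && hitB board x y xd yd player (-2) then (1:Int) else 0)) 3 := by
  rcases hc with hc | hc <;> subst hc <;>
  (by_cases hb1 : xd ≤ x ∧ x - xd < (board.length : Int) ∧
                  yd ≤ y ∧ y - yd < (board.length : Int) <;>
   by_cases hb2 : xd ≤ x - xd ∧ x - xd - xd < (board.length : Int) ∧
                  yd ≤ y - yd ∧ y - yd - yd < (board.length : Int) <;>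
   cases hc1 : pvCellAt board (x - xd) (y - yd) == player <;>
   cases hc2 : pvCellAt board (x - xd - xd) (y - yd - yd) == player <;>
   (simp only [hit_m1, hit_m2]; simp [loopA2, hb1, hb2, hc1, hc2]))

-- ===== VERDICT (by name: the statement is the Claim_ definition above) =====
theorem countDirection_spec : Claim_equal_countDirection := by
  intro board x y xd yd player _ _
  unfold Spec_countDirection countDirection countDirection_alt
  cases hm2 : hitB board x y xd yd player 1 <;>
  cases hm3 : hitB board x y xd yd player 2 <;>
  simp only [fwd_eval, hm2, hm3, Bool.and_self, Bool.and_true, Bool.and_false] <;>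
  norm_num <;>
  (try rw [back_eval board xd yd player x y _ (by omega)]) <;>
  cases hm1 : hitB board x y xd yd player (-1) <;>
  cases hm0 : hitB board x y xd yd player (-2) <;>
  simp [hm0, hm1] <;> omega
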